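-- pv_equiv track=rewrite | github.com/gzhawk/trmxlx2nmea | xlx2nmea.py | msgLstGSV
-- ===== SOURCE A (Python) =====
-- GSV_SUBELEM_NUM=7
--
-- def GenChkSum(Msg,cm):
--     cs = 0
--     for i in Msg:
--         cs ^= i
--     if not cm:
--         cs ^= 0x2C # hex of ','
--     return (0xFF&cs)
--
-- def GenNMEAMsg(*itemList):
--     l = len(itemList)
--     if not l:
--         return ''
--
--     msg = ''
--     for i in range(l):
--         msg += itemList[i]
--
--     cs = GenChkSum(bytes(msg,'utf-8'), l%2)
--     cs = hex(cs).upper()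
--     cs = str(cs)[2:].zfill(2)
--
--     msg = ''
--     for i in range(l):
--         if not i:
--             msg += '$' + itemList[i]
--         else:
--             msg += ',' + itemList[i]
--
--     return msg + '*' + cs
--
-- def msgLstGSV(gsv_type, svInfoLst, msg_num, msg_index, elem_num, index_start, sv_total):
--     gsv_list_tail = ''
--     for i in range(elem_num*GSV_SUBELEM_NUM):
--         if i == (elem_num*GSV_SUBELEM_NUM - 1):
--             gsv_list_tail += str(svInfoLst[index_start+i])
--         else:
--             gsv_list_tail += str(svInfoLst[index_start+i]) + ','
--
--     return GenNMEAMsg(gsv_type + 'GSV', str(msg_num), str(msg_index), str(sv_total), gsv_list_tail)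
-- ===== SOURCE B (Python) =====
-- GSV_SUBELEM_NUM = 7
--
-- def msgLstGSV(gsv_type, svInfoLst, msg_num, msg_index, elem_num, index_start, sv_total):
--     fields = [gsv_type + 'GSV', str(msg_num), str(msg_index), str(sv_total),
--               ','.join(str(svInfoLst[index_start + i])
--                        for i in range(elem_num * GSV_SUBELEM_NUM))]
--     body = ','.join(fields)
--     cs = 0
--     for b in body.encode('utf-8'):
--         cs ^= b
--     return '$' + body + '*' + format(cs & 0xFF, '02X')
-- ===== Notes on version B (the rewrite author's own statement) =====
-- stated objective: simpler
-- what changed: B drops the GenChkSum/GenNMEAMsg helper pipeline (body concatenated twice, checksum over the comma-less concatenation with a parity-conditional 0x2C XOR, hex/upper/slice/zfill formatting) and instead comma-joins the five fields once, XORs that body in a single pass, and formats the checksum directly as two uppercase hex digits.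
import Mathlib
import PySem

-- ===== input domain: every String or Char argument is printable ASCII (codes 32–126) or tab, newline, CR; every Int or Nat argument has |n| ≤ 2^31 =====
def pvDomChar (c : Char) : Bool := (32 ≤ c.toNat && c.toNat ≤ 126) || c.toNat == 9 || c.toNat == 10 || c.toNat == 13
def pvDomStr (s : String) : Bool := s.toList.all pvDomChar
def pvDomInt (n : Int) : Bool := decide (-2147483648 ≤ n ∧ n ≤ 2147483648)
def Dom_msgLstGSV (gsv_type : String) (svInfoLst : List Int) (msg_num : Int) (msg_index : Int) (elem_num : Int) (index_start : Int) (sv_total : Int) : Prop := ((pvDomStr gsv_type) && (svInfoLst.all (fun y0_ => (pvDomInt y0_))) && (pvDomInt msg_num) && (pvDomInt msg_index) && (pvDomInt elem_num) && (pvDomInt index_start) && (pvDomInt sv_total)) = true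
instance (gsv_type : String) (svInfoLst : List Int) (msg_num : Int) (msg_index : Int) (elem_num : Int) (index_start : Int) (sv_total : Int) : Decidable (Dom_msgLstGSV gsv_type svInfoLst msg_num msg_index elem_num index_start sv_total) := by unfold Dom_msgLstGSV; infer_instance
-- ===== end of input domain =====

-- B replaces the helper pipeline (body built twice, checksum over the comma-less
-- concatenation with a parity-conditional 0x2C XOR, hex/upper/slice/zfill formatting)
-- by one comma-join of the five fields, one XOR pass over that body, and direct
-- two-digit uppercase hex formatting; objective: simpler.
-- Python strings are represented as List Char inside the ports; the entry point
-- returns String.ofList of the assembled character list.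

-- ===== PORT A =====

-- little-endian accumulation of Python's hex(n) digit string for n : Nat
-- (Nat.toDigits 16 produces exactly Python's lowercase hex digits, '0' for 0)
-- hex(cs).upper(), then [2:], then .zfill(2)
def pvHexUpper2 (cs : Nat) : List Char :=
  PySem.Chars.zfill (PySem.Chars.slice (PySem.Chars.upper ('0' :: 'x' :: Nat.toDigits 16 cs)) (some 2) none) 2

-- GenChkSum(Msg, cm): XOR all bytes, XOR 0x2C if cm is falsy, mask with 0xFF
def pvGenChkSum (msg : List Char) (cm : Nat) : Nat :=
  let cs := msg.foldl (fun cs c => cs ^^^ c.toNat) 0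
  let cs := if cm = 0 then cs ^^^ 0x2C else cs
  0xFF &&& cs

-- GenNMEAMsg(*itemList); 'for i in range(l): msg += itemList[i]' is the fold over the list,
-- the second loop's 'if not i' is the index-0 test of the enumerated fold
def pvGenNMEAMsg (itemList : List (List Char)) : List Char :=
  let l := itemList.length
  if l = 0 then [] else
    let msg := itemList.foldl (fun acc it => acc ++ it) []
    let cs := pvGenChkSum msg (l % 2)
    let csStr := pvHexUpper2 cs
    let msg := (PySem.List.enumerate itemList).foldl
      (fun acc p => if p.1 = 0 then acc ++ '$' :: p.2 else acc ++ ',' :: p.2) []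
    msg ++ '*' :: csStr

def msgLstGSV (gsv_type : String) (svInfoLst : List Int) (msg_num : Int) (msg_index : Int) (elem_num : Int) (index_start : Int) (sv_total : Int) : String :=
  -- GSV_SUBELEM_NUM = 7
  let tail := (PySem.List.pyRange 0 (elem_num * 7) 1).foldl
    (fun acc i =>
      if i = elem_num * 7 - 1
      then acc ++ PySem.Int.toChars (PySem.List.pyGetD svInfoLst (index_start + i) 0)
      else acc ++ PySem.Int.toChars (PySem.List.pyGetD svInfoLst (index_start + i) 0) ++ [',']) []
  String.ofList (pvGenNMEAMsg
    [gsv_type.toList ++ ['G', 'S', 'V'], PySem.Int.toChars msg_num,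
     PySem.Int.toChars msg_index, PySem.Int.toChars sv_total, tail])

-- ===== PORT B =====

-- format(n, '02X') for n < 256
def pvFmt02X (n : Nat) : List Char :=
  [Nat.digitChar (n / 16), Nat.digitChar (n % 16)].map (fun c => (PySem.Chars.upper [c]).headD c)

def msgLstGSV_alt (gsv_type : String) (svInfoLst : List Int) (msg_num : Int) (msg_index : Int) (elem_num : Int) (index_start : Int) (sv_total : Int) : String :=
  let fields : List (List Char) :=
    [gsv_type.toList ++ ['G', 'S', 'V'], PySem.Int.toChars msg_num,
     PySem.Int.toChars msg_index, PySem.Int.toChars sv_total,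
     PySem.Chars.join [','] ((PySem.List.pyRange 0 (elem_num * 7) 1).map
       (fun i => PySem.Int.toChars (PySem.List.pyGetD svInfoLst (index_start + i) 0)))]
  let body := PySem.Chars.join [','] fields
  let cs := body.foldl (fun c b => c ^^^ b.toNat) 0
  String.ofList ('$' :: body ++ '*' :: pvFmt02X (cs &&& 0xFF))

-- ===== PRECONDITION & SPEC =====
-- Pre_ excludes exactly the inputs on which A raises IndexError (some svInfoLst[index_start+i]
-- out of range, negative indices counting from the end); B raises there too.
def Pre_msgLstGSV (gsv_type : String) (svInfoLst : List Int) (msg_num : Int) (msg_index : Int) (elem_num : Int) (index_start : Int) (sv_total : Int) : Prop :=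
  elem_num * 7 ≤ 0 ∨
    (-(svInfoLst.length : Int) ≤ index_start ∧ index_start + elem_num * 7 ≤ (svInfoLst.length : Int))
instance (gsv_type : String) (svInfoLst : List Int) (msg_num : Int) (msg_index : Int) (elem_num : Int) (index_start : Int) (sv_total : Int) : Decidable (Pre_msgLstGSV gsv_type svInfoLst msg_num msg_index elem_num index_start sv_total) := by unfold Pre_msgLstGSV; infer_instance

def pvWitness_msgLstGSV : String × List Int × Int × Int × Int × Int × Int :=
  ("GP", [21, 45, 170, 30, 18, 220, 41, 7, 60, 100, 35, 12, 300, 44], 2, 1, 2, 0, 7)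

def Spec_msgLstGSV (gsv_type : String) (svInfoLst : List Int) (msg_num : Int) (msg_index : Int) (elem_num : Int) (index_start : Int) (sv_total : Int) (out : String) : Prop := out = msgLstGSV_alt gsv_type svInfoLst msg_num msg_index elem_num index_start sv_total
instance (gsv_type : String) (svInfoLst : List Int) (msg_num : Int) (msg_index : Int) (elem_num : Int) (index_start : Int) (sv_total : Int) (out : String) : Decidable (Spec_msgLstGSV gsv_type svInfoLst msg_num msg_index elem_num index_start sv_total out) := by unfold Spec_msgLstGSV; infer_instance

-- ===== CLAIM (what is proved, stated in full; the proofs are below) =====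
def Claim_equal_msgLstGSV : Prop := ∀ (gsv_type : String) (svInfoLst : List Int) (msg_num : Int) (msg_index : Int) (elem_num : Int) (index_start : Int) (sv_total : Int), Dom_msgLstGSV gsv_type svInfoLst msg_num msg_index elem_num index_start sv_total → Pre_msgLstGSV gsv_type svInfoLst msg_num msg_index elem_num index_start sv_total → Spec_msgLstGSV gsv_type svInfoLst msg_num msg_index elem_num index_start sv_total (msgLstGSV gsv_type svInfoLst msg_num msg_index elem_num index_start sv_total)

-- ===== LEMMAS AND PROOFS =====

-- pyRange is empty when the bound is not above the start
theorem pvRange_nil (a n : Int) (h : n ≤ a) : PySem.List.pyRange a n 1 = [] := by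
  simp [PySem.List.pyRange, h]

-- A's last-gets-no-comma flatMap over a nonempty range equals B's comma-join
theorem pvTailAux (f : Int → List Char) (n : Int) :
    ∀ (k : Nat) (a : Int), n - a = (k : Int) + 1 →
    (PySem.List.pyRange a n 1).flatMap (fun i => f i ++ if i = n - 1 then [] else [','])
      = PySem.Chars.join [','] ((PySem.List.pyRange a n 1).map f) := by
  intro k
  induction k with
  | zero =>
    intro a h
    have ha : a < n := by omega
    rw [PySem.List.pyRange_one_cons ha, pvRange_nil _ _ (by omega)]
    simp [PySem.Chars.join_singleton]
    omega
  | succ m ih =>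
    intro a h
    have ha : a < n := by omega
    have ha1 : a + 1 < n := by omega
    rw [PySem.List.pyRange_one_cons ha]
    have hr := PySem.List.pyRange_one_cons ha1
    simp only [List.flatMap_cons, List.map_cons]
    rw [hr, List.map_cons, PySem.Chars.join_cons_cons, ← List.map_cons, ← hr]
    rw [ih (a + 1) (by omega)]
    have hne : ¬ (a = n - 1) := by omega
    simp [hne]

-- A's tail-building fold equals B's comma-join, for every n
theorem pvTail_eq (f : Int → List Char) (n : Int) :
    (PySem.List.pyRange 0 n 1).foldl
      (fun acc i => if i = n - 1 then acc ++ f i else acc ++ f i ++ [',']) []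
    = PySem.Chars.join [','] ((PySem.List.pyRange 0 n 1).map f) := by
  have hstep : (fun (acc : List Char) (i : Int) =>
        if i = n - 1 then acc ++ f i else acc ++ f i ++ [','])
      = fun acc i => acc ++ (f i ++ if i = n - 1 then [] else [',']) := by
    funext acc i
    by_cases h : i = n - 1 <;> simp [h]
  rw [hstep, PySem.List.foldl_append_eq_flatMap]
  by_cases hn : n ≤ 0
  · rw [pvRange_nil _ _ hn]; rfl
  · exact List.nil_append _ ▸ pvTailAux f n (n - 1).toNat 0 (by omega)

-- shift the accumulator out of an XOR fold
theorem pvXfold (a : Nat) (l : List Char) :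
    l.foldl (fun c b => c ^^^ b.toNat) a = a ^^^ l.foldl (fun c b => c ^^^ b.toNat) 0 := by
  induction l generalizing a with
  | nil => simp
  | cons x xs ih =>
    simp only [List.foldl_cons]
    rw [ih (a ^^^ x.toNat), ih (0 ^^^ x.toNat)]
    simp [Nat.xor_assoc]

-- XOR fold splits over append
theorem pvX_append (l1 l2 : List Char) :
    (l1 ++ l2).foldl (fun c b => c ^^^ b.toNat) 0
      = l1.foldl (fun c b => c ^^^ b.toNat) 0 ^^^ l2.foldl (fun c b => c ^^^ b.toNat) 0 := by
  rw [List.foldl_append, pvXfold]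

-- XOR fold over a cons
theorem pvX_cons (c : Char) (l : List Char) :
    (c :: l).foldl (fun cs b => cs ^^^ b.toNat) 0
      = c.toNat ^^^ l.foldl (fun cs b => cs ^^^ b.toNat) 0 := by
  simp only [List.foldl_cons]
  rw [pvXfold]
  simp

-- the two hex formattings agree on all masked checksums
set_option maxRecDepth 4096 in
theorem pvHex_eq : ∀ m : Fin 256, pvHexUpper2 m.val = pvFmt02X m.val := by decide

-- ===== VERDICT (by name: the statement is the Claim_ definition above) =====
theorem msgLstGSV_spec : Claim_equal_msgLstGSV := by
  intro gsv_type svInfoLst msg_num msg_index elem_num index_start sv_total _ _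
  unfold Spec_msgLstGSV msgLstGSV msgLstGSV_alt
  rw [pvTail_eq]
  dsimp only
  generalize gsv_type.toList ++ ['G', 'S', 'V'] = F0
  generalize PySem.Int.toChars msg_num = F1
  generalize PySem.Int.toChars msg_index = F2
  generalize PySem.Int.toChars sv_total = F3
  generalize PySem.Chars.join [','] ((PySem.List.pyRange 0 (elem_num * 7) 1).map
      (fun i => PySem.Int.toChars (PySem.List.pyGetD svInfoLst (index_start + i) 0))) = T
  apply congrArg
  simp only [pvGenNMEAMsg, pvGenChkSum, List.length_cons, List.length_nil, List.foldl_cons,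
    List.foldl_nil, PySem.List.enumerate, PySem.Chars.join_cons_cons, PySem.Chars.join_singleton]
  norm_num
  -- both sides are '$' :: F0 ++ ',' :: … ++ '*' :: <formatted checksum>; it remains to
  -- identify the two checksum fields
  have hcs :
      pvHexUpper2 (255 &&&
          List.foldl (fun cs c => cs ^^^ c.toNat)
            (List.foldl (fun cs c => cs ^^^ c.toNat)
              (List.foldl (fun cs c => cs ^^^ c.toNat)
                (List.foldl (fun cs c => cs ^^^ c.toNat)
                  (List.foldl (fun cs c => cs ^^^ c.toNat) 0 F0) F1) F2) F3) T)
        = pvFmt02X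
            ((F0 ++ ',' :: (F1 ++ ',' :: (F2 ++ ',' :: (F3 ++ ',' :: T)))).foldl
              (fun c b => c ^^^ b.toNat) 0 &&& 255) := by
    have hval : 255 &&&
        List.foldl (fun cs c => cs ^^^ c.toNat)
          (List.foldl (fun cs c => cs ^^^ c.toNat)
            (List.foldl (fun cs c => cs ^^^ c.toNat)
              (List.foldl (fun cs c => cs ^^^ c.toNat)
                (List.foldl (fun cs c => cs ^^^ c.toNat) 0 F0) F1) F2) F3) T
        = (F0 ++ ',' :: (F1 ++ ',' :: (F2 ++ ',' :: (F3 ++ ',' :: T)))).foldl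
            (fun c b => c ^^^ b.toNat) 0 &&& 255 := by
      rw [Nat.and_comm]
      congr 1
      rw [pvXfold _ T, pvXfold _ F3, pvXfold _ F2, pvXfold _ F1]
      simp only [pvX_append, pvX_cons]
      simp [Nat.xor_assoc, Nat.xor_left_comm]
    rw [hval]
    have hlt : (F0 ++ ',' :: (F1 ++ ',' :: (F2 ++ ',' :: (F3 ++ ',' :: T)))).foldl
        (fun c b => c ^^^ b.toNat) 0 &&& 255 < 256 :=
      lt_of_le_of_lt Nat.and_le_right (by norm_num)
    exact pvHex_eq ⟨_, hlt⟩
  rw [hcs]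
  congr 1
  simp [List.foldl_append]
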